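-- pv_equiv track=rewrite | github.com/pimlicolabs/alto | fix_imports.py | find_duplicate_imports
-- ===== SOURCE A (Python) =====
-- from collections import defaultdict
--
-- def find_duplicate_imports(imports):
--     """Find imports from the same module."""
--     module_imports = defaultdict(list)
--
--     for imp in imports:
--         module_imports[imp['module']].append(imp)
--
--     duplicates = {}
--     for module, imps in module_imports.items():
--         if len(imps) > 1:
--             # Check if there's a type and value import
--             has_type = any(i['type'] == 'type' for i in imps)
--             has_value = any(i['type'] == 'value' for i in imps)
--
--             if has_type and has_value:
--                 duplicates[module] = imps
--
--     return duplicates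
-- ===== SOURCE B (Python) =====
-- from collections import Counter
--
-- def find_duplicate_imports(imports):
--     """Find imports from the same module."""
--     counts = Counter(imp['module'] for imp in imports)
--     type_mods = {imp['module'] for imp in imports if imp.get('type') == 'type'}
--     value_mods = {imp['module'] for imp in imports if imp.get('type') == 'value'}
--     wanted = {m for m in counts if counts[m] > 1} & type_mods & value_mods
--     duplicates = {}
--     for imp in imports:
--         m = imp['module']
--         if m in wanted:
--             duplicates.setdefault(m, []).append(imp)
--     return duplicates
-- ===== Notes on version B (the rewrite author's own statement) =====
-- stated objective: alternative
-- what changed: B replaces A's group-then-rescan (dict of per-module lists, then nested any() scans over each group) with a Counter plus two set comprehensions intersected into the set of qualifying modules, followed by one regrouping pass that only collects imports of qualifying modules.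
import Mathlib
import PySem

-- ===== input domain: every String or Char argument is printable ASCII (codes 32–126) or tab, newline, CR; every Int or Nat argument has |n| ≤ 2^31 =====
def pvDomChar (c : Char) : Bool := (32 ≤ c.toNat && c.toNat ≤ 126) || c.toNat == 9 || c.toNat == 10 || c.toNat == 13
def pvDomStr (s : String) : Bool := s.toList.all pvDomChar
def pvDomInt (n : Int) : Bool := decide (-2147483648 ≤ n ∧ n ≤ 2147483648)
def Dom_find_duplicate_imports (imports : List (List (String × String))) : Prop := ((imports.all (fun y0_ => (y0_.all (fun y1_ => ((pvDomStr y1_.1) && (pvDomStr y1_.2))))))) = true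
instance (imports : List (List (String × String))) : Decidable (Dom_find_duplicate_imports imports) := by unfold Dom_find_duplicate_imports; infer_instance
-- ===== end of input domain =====

-- B replaces A's group-then-rescan (dict of per-module lists, then nested any() scans per group) with
-- a Counter plus two set comprehensions intersected into the set of qualifying modules, followed by a
-- single regrouping pass that only collects imports of qualifying modules (return values compared).
-- Shared primitive only: imp[k] = first match in the association list (KeyError excluded by Pre_).
def pyLook (imp : List (String × String)) (k : String) : String :=
  ((PySem.Dict.mk imp).get? k).getD ""   -- the .getD "" is unreachable under Pre_ (Python raises KeyError there)

-- ===== PORT A =====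
def find_duplicate_imports (imports : List (List (String × String))) : List (String × List (List (String × String))) :=
  let module_imports : PySem.Dict String (List (List (String × String))) :=
    imports.foldl (fun d imp => d.modify (pyLook imp "module") [] (fun l => l ++ [imp])) PySem.Dict.empty
  let duplicates : PySem.Dict String (List (List (String × String))) :=
    module_imports.items.foldl (fun dups p =>
      if p.2.length > 1 then
        let has_type := p.2.any (fun i => pyLook i "type" == "type")
        let has_value := p.2.any (fun i => pyLook i "type" == "value")
        if has_type && has_value then dups.insert p.1 p.2 else dups
      else dups) PySem.Dict.empty
  duplicates.items

-- ===== PORT B =====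
-- imp.get('type') == 'type' is ported as get? "type" == some "type" (None compares unequal to any string)
def find_duplicate_imports_alt (imports : List (List (String × String))) : List (String × List (List (String × String))) :=
  let counts : PySem.Dict String Int := PySem.Dict.counter (imports.map (fun imp => pyLook imp "module"))
  let type_mods : PySem.Set String :=
    imports.foldl (fun s imp =>
      if ((PySem.Dict.mk imp).get? "type") == some "type" then PySem.Set.add s (pyLook imp "module") else s)
      PySem.Set.empty
  let value_mods : PySem.Set String :=
    imports.foldl (fun s imp =>
      if ((PySem.Dict.mk imp).get? "type") == some "value" then PySem.Set.add s (pyLook imp "module") else s)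
      PySem.Set.empty
  let wanted : PySem.Set String :=
    PySem.Set.inter (PySem.Set.inter
      (PySem.Set.ofList (counts.keys.filter (fun m => counts.getD m 0 > 1))) type_mods) value_mods
  let duplicates : PySem.Dict String (List (List (String × String))) :=
    imports.foldl (fun d imp =>
      let m := pyLook imp "module"
      if wanted.contains m then d.modify m [] (fun l => l ++ [imp]) else d)  -- setdefault(m, []).append(imp)
      PySem.Dict.empty
  duplicates.items

-- ===== PRECONDITION & SPEC =====
-- input-shape helpers used by Pre_ (and by the proofs below)
def modOf (imp : List (String × String)) : String := pyLook imp "module"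
def isT (i : List (String × String)) : Bool := pyLook i "type" == "type"
def isV (i : List (String × String)) : Bool := pyLook i "type" == "value"
def grp (imports : List (List (String × String))) (k : String) : List (List (String × String)) :=
  imports.filter (fun imp => modOf imp == k)
-- a module's group raises no KeyError in A's any() scans iff it is a singleton, or every import has a
-- 'type' key, or both a 'type' and a 'value' import occur before the first import lacking 'type'
def okGroup (g : List (List (String × String))) : Bool :=
  decide (g.length ≤ 1) || g.all (fun i => (PySem.Dict.mk i).contains "type") ||
  (let pre := g.takeWhile (fun i => (PySem.Dict.mk i).contains "type")
   pre.any isT && pre.any isV)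

-- Pre_ excludes exactly the inputs on which the Python A raises KeyError: an import missing the
-- 'module' key, or a multi-import module whose any() scans reach an import missing the 'type' key.
def Pre_find_duplicate_imports (imports : List (List (String × String))) : Prop :=
  (∀ imp ∈ imports, (PySem.Dict.mk imp).contains "module" = true) ∧
  (∀ imp ∈ imports, okGroup (grp imports (modOf imp)) = true)
instance (imports : List (List (String × String))) : Decidable (Pre_find_duplicate_imports imports) := by
  unfold Pre_find_duplicate_imports; infer_instance

def pvWitness_find_duplicate_imports : (List (List (String × String))) :=
  [[("module", "a"), ("type", "type")], [("module", "a"), ("type", "value")]]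

def Spec_find_duplicate_imports (imports : List (List (String × String))) (out : List (String × List (List (String × String)))) : Prop := out = find_duplicate_imports_alt imports
instance (imports : List (List (String × String))) (out : List (String × List (List (String × String)))) : Decidable (Spec_find_duplicate_imports imports out) := by unfold Spec_find_duplicate_imports; infer_instance

-- ===== CLAIM (what is proved, stated in full; the proofs are below) =====
def Claim_equal_find_duplicate_imports : Prop := ∀ (imports : List (List (String × String))), Dom_find_duplicate_imports imports → Pre_find_duplicate_imports imports → Spec_find_duplicate_imports imports (find_duplicate_imports imports)

-- ===== LEMMAS AND PROOFS =====

-- abbreviation for the predicate A's second loop tests on a group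
def predK (imports : List (List (String × String))) (k : String) : Bool :=
  decide ((grp imports k).length > 1) && ((grp imports k).any isT && (grp imports k).any isV)

-- imp.get('type') == 'type' agrees with A's imp['type'] == 'type' wherever the latter is defined,
-- and is false where the key is missing (A's lookup there is the unreachable .getD "")
lemma condT_eq (i : List (String × String)) :
    (((PySem.Dict.mk i).get? "type") == some "type") = isT i := by
  simp [isT, pyLook]
  cases (PySem.Dict.mk i).get? "type" <;> simp

lemma condV_eq (i : List (String × String)) :
    (((PySem.Dict.mk i).get? "type") == some "value") = isV i := by
  simp [isV, pyLook]
  cases (PySem.Dict.mk i).get? "type" <;> simp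

-- A's grouping loop: the value at key k is the sublist of imports whose module is k
lemma A_group_getD (imports : List (List (String × String))) (k : String) :
    (imports.foldl (fun d imp => d.modify (pyLook imp "module") [] (fun l => l ++ [imp]))
      (PySem.Dict.empty : PySem.Dict String (List (List (String × String))))).getD k []
    = grp imports k := by
  have h := List.foldl_map (f := fun imp : List (String × String) => (pyLook imp "module", imp))
      (g := fun (d : PySem.Dict String (List (List (String × String)))) (p : String × List (String × String)) => d.modify p.1 [] (fun l => l ++ [p.2]))
      (l := imports) (init := (PySem.Dict.empty : PySem.Dict String (List (List (String × String)))))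
  rw [← h, PySem.Dict.getD_foldl_modify_append]
  simp [grp, modOf, List.filter_map, Function.comp_def]

-- A's second loop: conditional inserts at pairwise-fresh keys append in order
lemma A_filter_items (ps : List (String × List (List (String × String)))) : ∀ (d : PySem.Dict String (List (List (String × String)))),
    (ps.map Prod.fst).Nodup → (∀ p ∈ ps, d.contains p.1 = false) →
    (ps.foldl (fun dups p =>
      if p.2.length > 1 then
        let has_type := p.2.any (fun i => pyLook i "type" == "type")
        let has_value := p.2.any (fun i => pyLook i "type" == "value")
        if has_type && has_value then dups.insert p.1 p.2 else dups
      else dups) d).items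
    = d.items ++ ps.filter (fun p => decide (p.2.length > 1) && (p.2.any isT && p.2.any isV)) := by
  induction ps with
  | nil => simp
  | cons p rest ih =>
    intro d hnd hfresh
    simp only [List.map_cons, List.nodup_cons] at hnd
    have hdc : d.contains p.1 = false := hfresh p (by simp)
    have hfresh' : ∀ q ∈ rest, q.1 ≠ p.1 := by
      intro q hq heq
      exact hnd.1 (heq ▸ List.mem_map_of_mem hq)
    simp only [List.foldl_cons]
    by_cases h1 : p.2.length > 1
    · by_cases h2 : (p.2.any (fun i => pyLook i "type" == "type") && p.2.any (fun i => pyLook i "type" == "value")) = true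
      · rw [if_pos h1]
        simp only [h2, if_true]
        rw [ih _ hnd.2 (by
          intro q hq
          rw [PySem.Dict.contains_insert]
          simp [hfresh' q hq, hfresh q (by simp [hq])])]
        rw [PySem.Dict.items_insert_of_not_contains (h := hdc)]
        have h2' : (p.2.any isT && p.2.any isV) = true := by simpa [isT, isV] using h2
        simp [h1, h2', List.append_assoc]
      · rw [if_pos h1]
        simp only [h2, Bool.false_eq_true, if_false]
        rw [ih _ hnd.2 (fun q hq => hfresh q (by simp [hq]))]
        simp only [Bool.not_eq_true] at h2
        have h2' : (p.2.any isT && p.2.any isV) = false := by simpa [isT, isV] using h2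
        simp [h1, h2']
    · rw [if_neg h1]
      rw [ih _ hnd.2 (fun q hq => hfresh q (by simp [hq]))]
      simp [h1]

-- A's result: the module set in first-appearance order, filtered by the group predicate
lemma A_eq (imports : List (List (String × String))) :
    find_duplicate_imports imports
    = ((PySem.Set.ofList (imports.map modOf)).filter (predK imports)).map
        (fun k => (k, grp imports k)) := by
  simp only [find_duplicate_imports]
  set mi := imports.foldl (fun d imp => d.modify (pyLook imp "module") [] (fun l => l ++ [imp]))
      (PySem.Dict.empty : PySem.Dict String (List (List (String × String)))) with hmi
  have hKmi : mi.keys = PySem.Set.ofList (imports.map modOf) := by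
    rw [hmi, PySem.Dict.keys_foldl_modify_key]
    simp [PySem.Set.update_nil_left]
    rfl
  have hndmi : mi.keys.Nodup := by
    rw [hmi]; exact PySem.Dict.nodup_keys_foldl_modify_key _ _ _ _ _ PySem.Dict.nodup_keys_empty
  have hitmi : mi.items = (PySem.Set.ofList (imports.map modOf)).map (fun k => (k, grp imports k)) := by
    rw [PySem.Dict.items_eq_map_keys mi hndmi [], hKmi]
    simp only [hmi, A_group_getD]
  rw [A_filter_items mi.items PySem.Dict.empty (by
      have : mi.items.map Prod.fst = mi.keys := rfl
      rw [this]; exact hndmi)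
    (by intro p _; exact PySem.Dict.contains_empty _)]
  rw [hitmi]
  have hemp : (PySem.Dict.empty : PySem.Dict String (List (List (String × String)))).items = [] := rfl
  rw [hemp, List.nil_append, List.filter_map]
  congr 1

-- a loop that updates only when c holds is the plain loop over the filtered list
lemma foldl_if_filter {α β : Type} (c : α → Bool) (g : β → α → β) :
    ∀ (l : List α) (d : β),
    l.foldl (fun d x => if c x then g d x else d) d = (l.filter c).foldl g d := by
  intro l
  induction l with
  | nil => intro d; rfl
  | cons x xs ih =>
    intro d
    by_cases h : c x = true
    · simp [h, ih]
    · simp only [Bool.not_eq_true] at h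
      simp [h, ih]

-- set(...) commutes with filtering the underlying list
lemma ofList_filter {α : Type} [BEq α] [LawfulBEq α] (p : α → Bool) (l : List α) :
    PySem.Set.ofList (l.filter p) = (PySem.Set.ofList l).filter p := by
  induction l using List.reverseRecOn with
  | nil => rfl
  | append_singleton xs x ih =>
    rw [List.filter_append, PySem.Set.ofList_append_singleton]
    by_cases hp : p x = true
    · simp only [List.filter_cons, hp, if_true, List.filter_nil,
        PySem.Set.ofList_append_singleton, ih]
      rw [PySem.Set.add_eq_ite, PySem.Set.add_eq_ite]
      by_cases hm : x ∈ PySem.Set.ofList xs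
      · rw [if_pos hm, if_pos (by simp [List.mem_filter, hm, hp])]
      · rw [if_neg hm, if_neg (by simp [List.mem_filter, hm]), List.filter_append]
        simp [hp]
    · simp only [Bool.not_eq_true] at hp
      simp only [List.filter_cons, hp, Bool.false_eq_true, if_false, List.filter_nil,
        List.append_nil, ih]
      rw [PySem.Set.add_eq_ite]
      by_cases hm : x ∈ PySem.Set.ofList xs
      · rw [if_pos hm]
      · rw [if_neg hm, List.filter_append]
        simp [hp]

-- membership in B's type_mods set: exactly the modules whose group has a 'type' import
lemma mem_foldl_cond_add (c : List (String × String) → Bool)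
    (imports : List (List (String × String))) (k : String) :
    (k ∈ imports.foldl (fun s imp => if c imp then PySem.Set.add s (pyLook imp "module") else s)
        (PySem.Set.empty : PySem.Set String))
    ↔ ∃ i ∈ imports, c i = true ∧ modOf i = k := by
  rw [foldl_if_filter, ← PySem.Set.update_map_eq_foldl_add]
  have hupd : (PySem.Set.empty : PySem.Set String).update ((imports.filter c).map (fun imp => pyLook imp "module"))
      = PySem.Set.ofList ((imports.filter c).map (fun imp => pyLook imp "module")) := rfl
  rw [hupd]
  simp [PySem.Set.mem_ofList, List.mem_map, List.mem_filter, modOf]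
  constructor
  · rintro ⟨i, ⟨hi, hc⟩, hk⟩; exact ⟨i, hi, hc, hk⟩
  · rintro ⟨i, hi, hc, hk⟩; exact ⟨i, ⟨hi, hc⟩, hk⟩

-- the Counter's count at k is the size of module k's group
lemma count_eq_grp_length (imports : List (List (String × String))) (k : String) :
    (imports.map (fun imp => pyLook imp "module")).count k = (grp imports k).length := by
  rw [List.count_eq_countP]
  rw [List.countP_map, List.countP_eq_length_filter]
  simp [grp, modOf, Function.comp_def]

lemma ports_agree (imports : List (List (String × String))) :
    find_duplicate_imports imports = find_duplicate_imports_alt imports := by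
  rw [A_eq]
  simp only [find_duplicate_imports_alt]
  set S := PySem.Set.ofList (imports.map modOf) with hS
  set wanted : PySem.Set String :=
    PySem.Set.inter (PySem.Set.inter
      (PySem.Set.ofList (((PySem.Dict.counter (imports.map (fun imp => pyLook imp "module"))).keys).filter
        (fun m => (PySem.Dict.counter (imports.map (fun imp => pyLook imp "module"))).getD m 0 > 1)))
      (imports.foldl (fun s imp =>
        if ((PySem.Dict.mk imp).get? "type") == some "type" then PySem.Set.add s (pyLook imp "module") else s)
        PySem.Set.empty))
      (imports.foldl (fun s imp =>
        if ((PySem.Dict.mk imp).get? "type") == some "value" then PySem.Set.add s (pyLook imp "module") else s)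
        PySem.Set.empty) with hwanted
  -- the qualifying-module test agrees with A's per-group predicate on every module of S
  have hpred : ∀ k ∈ S, wanted.contains k = predK imports k := by
    intro k hk
    rw [Bool.eq_iff_iff, PySem.Set.contains_iff, hwanted]
    rw [PySem.Set.mem_inter, PySem.Set.mem_inter, PySem.Set.mem_ofList]
    rw [List.mem_filter]
    rw [PySem.Dict.keys_counter]
    simp only [mem_foldl_cond_add]
    have hSk : k ∈ PySem.Set.ofList (imports.map (fun imp => pyLook imp "module")) := by
      rw [hS] at hk
      simpa [PySem.Set.mem_ofList, modOf] using hk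
    have hcnt : (PySem.Dict.counter (imports.map fun imp => pyLook imp "module")).getD k 0
        = ((grp imports k).length : Int) := by
      rw [PySem.Dict.getD_counter, count_eq_grp_length]
    have hT : (∃ i ∈ imports, (((PySem.Dict.mk i).get? "type") == some "type") = true ∧ modOf i = k)
        ↔ (grp imports k).any isT = true := by
      simp only [condT_eq, List.any_eq_true, grp, List.mem_filter]
      constructor
      · rintro ⟨i, hi, ht, hm⟩; exact ⟨i, ⟨hi, by simp [hm]⟩, ht⟩
      · rintro ⟨i, ⟨hi, hm⟩, ht⟩; exact ⟨i, hi, ht, by simpa using hm⟩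
    have hV : (∃ i ∈ imports, (((PySem.Dict.mk i).get? "type") == some "value") = true ∧ modOf i = k)
        ↔ (grp imports k).any isV = true := by
      simp only [condV_eq, List.any_eq_true, grp, List.mem_filter]
      constructor
      · rintro ⟨i, hi, ht, hm⟩; exact ⟨i, ⟨hi, by simp [hm]⟩, ht⟩
      · rintro ⟨i, ⟨hi, hm⟩, ht⟩; exact ⟨i, hi, ht, by simpa using hm⟩
    rw [hT, hV]
    simp only [predK, hcnt, hSk, true_and, Bool.and_eq_true, decide_eq_true_eq]
    constructor
    · rintro ⟨⟨h1, h2⟩, h3⟩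
      exact ⟨by exact_mod_cast h1, h2, h3⟩
    · rintro ⟨h1, h2, h3⟩
      exact ⟨⟨by exact_mod_cast h1, h2⟩, h3⟩
  -- B's final grouping loop groups exactly the imports of qualifying modules
  have hsplit : (imports.foldl (fun d imp => if wanted.contains (pyLook imp "module") = true then d.modify (pyLook imp "module") [] (fun l => l ++ [imp]) else d) (PySem.Dict.empty : PySem.Dict String (List (List (String × String))))) = ((imports.filter (fun imp => wanted.contains (pyLook imp "module"))).foldl (fun d imp => d.modify (pyLook imp "module") [] (fun l => l ++ [imp])) (PySem.Dict.empty : PySem.Dict String (List (List (String × String))))) :=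
    foldl_if_filter (fun imp => wanted.contains (pyLook imp "module"))
      (fun d imp => d.modify (pyLook imp "module") [] (fun l => l ++ [imp])) imports PySem.Dict.empty
  rw [hsplit]
  set F := imports.filter (fun imp => wanted.contains (pyLook imp "module")) with hF
  set Bd := F.foldl (fun d imp => d.modify (pyLook imp "module") [] (fun l => l ++ [imp]))
      (PySem.Dict.empty : PySem.Dict String (List (List (String × String)))) with hBd
  have hK : Bd.keys = PySem.Set.ofList (F.map modOf) := by
    rw [hBd, PySem.Dict.keys_foldl_modify_key]
    simp [PySem.Set.update_nil_left]
    rfl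
  have hnd : Bd.keys.Nodup := by
    rw [hBd]; exact PySem.Dict.nodup_keys_foldl_modify_key _ _ _ _ _ PySem.Dict.nodup_keys_empty
  have hKS : Bd.keys = S.filter (fun k => wanted.contains k) := by
    rw [hK]
    have : F.map modOf = (imports.map modOf).filter (fun k => wanted.contains k) := by
      rw [List.filter_map, hF]
      congr 1
    rw [this, ofList_filter, hS]
  rw [PySem.Dict.items_eq_map_keys Bd hnd [], hKS]
  rw [List.filter_congr (q := predK imports) (fun k hk => hpred k hk)]
  apply List.map_congr_left
  intro k hk
  have hkS : k ∈ S := (List.mem_filter.mp hk).1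
  have hkw : wanted.contains k = true := by
    rw [hpred k hkS]; exact (List.mem_filter.mp hk).2
  rw [hBd, A_group_getD]
  have hgoal : grp imports k = grp F k := by
    rw [hF]
    unfold grp
    rw [List.filter_filter]
    apply List.filter_congr
    intro i _
    by_cases hm : (modOf i == k) = true
    · have hik : pyLook i "module" = k := by simpa [modOf] using hm
      simp [hik, modOf]
      exact (PySem.Set.contains_iff _ _).mp hkw
    · simp only [Bool.not_eq_true] at hm
      simp [modOf]
      intro h
      simp [modOf, h] at hm
  rw [hgoal]


-- ===== VERDICT =====
theorem find_duplicate_imports_spec : Claim_equal_find_duplicate_imports := by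
  intro imports _ _
  unfold Spec_find_duplicate_imports
  exact ports_agree imports
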